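-- pv_equiv track=rewrite | github.com/DataNindze/NindzeRecenzije | python scripts/train_split.py | choose_reviews
-- ===== SOURCE A (Python) =====
-- def choose_reviews(review_list, target_count):
--     selected = []
--     current_count = 0
--
--     for review_id, sentence_count in review_list:
--         if current_count >= target_count:
--             break
--
--         selected.append(review_id)
--         current_count += sentence_count
--
--     return selected, current_count
-- ===== SOURCE B (Python) =====
-- def choose_reviews(review_list, target_count):
--     # prefix-sum table: prefixes[i] = sentences counted before review i
--     prefixes = [0]
--     for _, sc in review_list:
--         prefixes.append(prefixes[-1] + sc)
--     # cutoff: leading prefixes strictly below target (stop at first crossing)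
--     k = 0
--     while k < len(review_list) and prefixes[k] < target_count:
--         k += 1
--     return [rid for rid, _ in review_list[:k]], prefixes[k]
-- ===== Notes on version B (the rewrite author's own statement) =====
-- stated objective: alternative
-- what changed: Replaced the running break-loop with a prefix-sum table, a cutoff index found as the count of leading prefixes below target, and a slice of the first k ids.
import Mathlib
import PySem

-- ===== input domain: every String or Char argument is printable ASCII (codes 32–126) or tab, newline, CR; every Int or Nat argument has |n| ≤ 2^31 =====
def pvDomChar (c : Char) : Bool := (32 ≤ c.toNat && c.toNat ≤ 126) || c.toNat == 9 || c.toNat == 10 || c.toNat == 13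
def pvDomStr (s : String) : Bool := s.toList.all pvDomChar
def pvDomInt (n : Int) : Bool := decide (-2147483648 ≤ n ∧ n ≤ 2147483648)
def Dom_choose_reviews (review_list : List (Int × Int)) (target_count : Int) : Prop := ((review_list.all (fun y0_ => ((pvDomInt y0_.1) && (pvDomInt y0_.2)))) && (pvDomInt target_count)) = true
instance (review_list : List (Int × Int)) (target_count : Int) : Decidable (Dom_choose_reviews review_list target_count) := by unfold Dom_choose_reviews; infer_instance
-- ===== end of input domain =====

-- B replaces A's running break-loop by a prefix-sum table plus a cutoff index and a
-- slice (objective: alternative decomposition, same cost).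

-- ===== PORT A =====
-- A's for-loop with its mutable state (selected, current_count); break = stop recursing.
def chooseLoop : List (Int × Int) → Int → Int → List Int × Int
  | [], _, cur => ([], cur)
  | (rid, sc) :: rest, tgt, cur =>
    if cur ≥ tgt then ([], cur)
    else
      let r := chooseLoop rest tgt (cur + sc)
      (rid :: r.1, r.2)

def choose_reviews (review_list : List (Int × Int)) (target_count : Int) : List Int × Int :=
  chooseLoop review_list target_count 0

-- ===== PORT B =====
-- Source B: prefixes[i] = sum of first i sentence counts (scanl builds that table);
-- k = number of leading prefixes strictly below target, capped at len(review_list);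
-- answer = ids of first k reviews, and prefixes[k].
def choose_reviews_alt (review_list : List (Int × Int)) (target_count : Int) : List Int × Int :=
  let prefixes := (review_list.map Prod.snd).scanl (· + ·) 0
  let k := min ((prefixes.takeWhile (fun p => p < target_count)).length) review_list.length
  ((review_list.take k).map Prod.fst, prefixes.getD k 0)

-- ===== PRECONDITION & SPEC =====
def Spec_choose_reviews (review_list : List (Int × Int)) (target_count : Int) (out : List Int × Int) : Prop := out = choose_reviews_alt review_list target_count
instance (review_list : List (Int × Int)) (target_count : Int) (out : List Int × Int) : Decidable (Spec_choose_reviews review_list target_count out) := by unfold Spec_choose_reviews; infer_instance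

-- ===== CLAIM (what is proved, stated in full; the proofs are below) =====
def Claim_equal_choose_reviews : Prop := ∀ (review_list : List (Int × Int)) (target_count : Int), Dom_choose_reviews review_list target_count → Spec_choose_reviews review_list target_count (choose_reviews review_list target_count)

-- ===== LEMMAS AND PROOFS =====

-- loop invariant: the break-loop started at accumulator c equals the prefix-sum/cutoff
-- computation with the scan seeded at c
theorem chooseLoop_eq (l : List (Int × Int)) (t : Int) (c : Int) :
    chooseLoop l t c =
      (let prefixes := (l.map Prod.snd).scanl (· + ·) c
       let k := min ((prefixes.takeWhile (fun p => p < t)).length) l.length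
       ((l.take k).map Prod.fst, prefixes.getD k 0)) := by
  induction l generalizing c with
  | nil => simp [chooseLoop, List.scanl, List.takeWhile]
  | cons hd tl ih =>
    obtain ⟨rid, sc⟩ := hd
    by_cases h : c ≥ t
    · have hnot : ¬ (c < t) := by omega
      simp [chooseLoop, h, List.scanl, hnot]
    · have hlt : c < t := by omega
      simp only [chooseLoop, if_neg h, ih (c + sc)]
      simp [List.scanl, hlt, Nat.succ_min_succ]

-- ===== VERDICT (by name: the statement is the Claim_ definition above) =====
theorem choose_reviews_spec : Claim_equal_choose_reviews := by
  intro l t _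
  unfold Spec_choose_reviews choose_reviews choose_reviews_alt
  exact chooseLoop_eq l t 0
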